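-- pv_equiv track=rewrite | github.com/jojkos/calendarPuzzle | solver.py | has_enough_space
-- ===== SOURCE A (Python) =====
-- from collections import deque
--
-- def is_valid(grid, r, c, blocked_areas):
--     """
--     Return True if row r and column c are in-bounds for grid[r],
--     and that cell is not blocked.
--     """
--     if r < 0 or r >= len(grid):
--         return False
--     if c < 0 or c >= len(grid[r]):
--         return False
--     # Check for blocked
--     if (r, c) in blocked_areas:
--         return False
--     return True
--
-- def find_contiguous_regions(grid, blocked_areas):
--     rows = len(grid)
--     visited = []
--     for r in range(rows):
--         visited.append([False] * len(grid[r]))  # visited[r] has same width as grid[r]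
--     directions = [(1,0), (-1,0), (0,1), (0,-1)]
--     regions = []
--
--     for r in range(rows):
--         for c in range(len(grid[r])):  # only iterate up to len(grid[r])
--             if not visited[r][c] and grid[r][c] == 0 and (r,c) not in blocked_areas:
--                 # BFS/DFS to find all connected empty cells
--                 queue = deque([(r, c)])
--                 visited[r][c] = True
--                 size = 0
--
--                 while queue:
--                     x, y = queue.popleft()
--                     size += 1
--                     for dx, dy in directions:
--                         nx, ny = x + dx, y + dy
--                         if is_valid(grid, nx, ny, blocked_areas):
--                             if not visited[nx][ny] and grid[nx][ny] == 0:
--                                 visited[nx][ny] = True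
--                                 queue.append((nx, ny))
--
--                 regions.append(size)
--     return regions
--
-- def has_enough_space(grid, blocked_areas, piece_areas, index):
--     # The pieces we have not placed yet:
--     remaining_areas = piece_areas[index:]
--     if not remaining_areas:
--         return True  # no pieces left
--     smallest_area = min(remaining_areas)
--
--     regions = find_contiguous_regions(grid, blocked_areas)
--     # If we find a region that is > 0 and < smallest_area => prune
--     for size in regions:
--         if 0 < size < smallest_area:
--             return False
--     return True
-- ===== SOURCE B (Python) =====
-- def has_enough_space(grid, blocked_areas, piece_areas, index):
--     remaining_areas = piece_areas[index:]
--     if not remaining_areas: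
--         return True
--     smallest_area = min(remaining_areas)
--
--     # All in-bounds empty, unblocked cells (row-major); no visited matrix anywhere.
--     empties = [(r, c) for r, row in enumerate(grid)
--                for c, v in enumerate(row)
--                if v == 0 and (r, c) not in blocked_areas]
--     cells = set(empties)
--     n = len(empties)
--
--     # For each empty cell, saturate its region with whole-set expansion steps
--     # (comp := comp | neighbours(comp) & cells) until no step adds a cell.
--     for start in empties:
--         comp = {start}
--         for _ in range(n):
--             grown = {(r + dr, c + dc) for (r, c) in comp
--                      for (dr, dc) in ((1, 0), (-1, 0), (0, 1), (0, -1))} & cells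
--             if grown <= comp:
--                 break
--             comp = comp | grown
--         if len(comp) < smallest_area:
--             return False
--     return True
-- ===== Notes on version B (the rewrite author's own statement) =====
-- stated objective: alternative
-- what changed: Replaces the shared-visited-matrix BFS region enumeration by a visited-free, per-cell fixpoint computation: the list of empty cells is built once by comprehension, and each cell's region is grown by whole-set expansion steps (comp := comp | neighbours(comp) & cells) until stable, then its size is compared against the smallest remaining piece.
import Mathlib
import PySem

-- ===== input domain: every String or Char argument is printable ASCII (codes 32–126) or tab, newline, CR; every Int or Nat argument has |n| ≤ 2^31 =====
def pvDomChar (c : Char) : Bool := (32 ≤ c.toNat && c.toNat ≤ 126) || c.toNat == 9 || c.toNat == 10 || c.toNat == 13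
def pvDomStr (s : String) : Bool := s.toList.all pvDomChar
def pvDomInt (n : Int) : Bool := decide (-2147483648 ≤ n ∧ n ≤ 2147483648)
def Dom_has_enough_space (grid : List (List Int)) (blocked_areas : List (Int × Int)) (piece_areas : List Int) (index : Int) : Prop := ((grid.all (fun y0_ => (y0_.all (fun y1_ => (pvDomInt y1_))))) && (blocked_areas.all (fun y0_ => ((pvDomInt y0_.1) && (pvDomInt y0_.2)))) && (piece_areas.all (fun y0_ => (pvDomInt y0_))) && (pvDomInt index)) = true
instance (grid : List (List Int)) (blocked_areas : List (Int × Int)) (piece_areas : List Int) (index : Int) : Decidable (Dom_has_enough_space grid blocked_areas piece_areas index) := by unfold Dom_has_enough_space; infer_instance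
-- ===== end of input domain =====

-- B replaces A's shared-visited-matrix BFS region enumeration by a visited-free
-- per-cell fixpoint: it lists the empty cells once by comprehension and grows each
-- cell's region by whole-set expansion steps until stable (objective: alternative).

-- ===== PORT A =====

-- grid[r] / grid[r][c] / visited[r][c]: every use below is guarded (loop bounds or
-- is_valid), so the index is nonnegative and in range; getD defaults are never read.
def pvRowA (grid : List (List Int)) (r : Int) : List Int :=
  (PySem.List.pyGet? grid r).getD []

def pvCellA (grid : List (List Int)) (r c : Int) : Int :=
  (PySem.List.pyGet? (pvRowA grid r) c).getD 0

def pvVGet (v : List (List Bool)) (r c : Int) : Bool :=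
  (PySem.List.pyGet? ((PySem.List.pyGet? v r).getD []) c).getD false

-- visited[r][c] = True  (indices nonneg and in range at every use site)
def pvVSet (v : List (List Bool)) (r c : Int) : List (List Bool) :=
  v.modify r.toNat (fun row => row.set c.toNat true)

def is_valid (grid : List (List Int)) (r c : Int) (blocked_areas : List (Int × Int)) : Bool :=
  if r < 0 || (grid.length : Int) ≤ r then false
  else if c < 0 || ((pvRowA grid r).length : Int) ≤ c then false
  else if blocked_areas.contains (r, c) then false
  else true

def pvTotalA (grid : List (List Int)) : Nat := (grid.map List.length).sum

-- the `while queue:` BFS loop; fuel (pvTotalA grid + 1) is an upper bound on the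
-- number of pops, so the fuel-0 branch is only reached with queue = []
def bfs_loop (grid : List (List Int)) (blocked_areas : List (Int × Int)) :
    Nat → List (Int × Int) → List (List Bool) → Int → (List (List Bool) × Int)
  | 0, _, visited, size => (visited, size)
  | fuel + 1, queue, visited, size =>
    match queue with
    | [] => (visited, size)
    | (x, y) :: rest =>
      let st := [((1 : Int), (0 : Int)), (-1, 0), (0, 1), (0, -1)].foldl
        (fun (st : List (List Bool) × List (Int × Int)) d =>
          let nb := (x + d.1, y + d.2)
          if is_valid grid nb.1 nb.2 blocked_areas &&
             (!pvVGet st.1 nb.1 nb.2 && (pvCellA grid nb.1 nb.2 == 0)) then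
            (pvVSet st.1 nb.1 nb.2, st.2 ++ [nb])
          else st) (visited, rest)
      bfs_loop grid blocked_areas fuel st.2 st.1 (size + 1)

def find_contiguous_regions (grid : List (List Int)) (blocked_areas : List (Int × Int)) :
    List Int :=
  let rows := grid.length
  -- visited.append([False] * len(grid[r]))
  let visited0 : List (List Bool) := grid.map (fun row => List.replicate row.length false)
  let res := (PySem.List.pyRange 0 (rows : Int) 1).foldl
    (fun (st : List (List Bool) × List Int) r =>
      (PySem.List.pyRange 0 ((pvRowA grid r).length : Int) 1).foldl
        (fun (st : List (List Bool) × List Int) c =>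
          if !pvVGet st.1 r c && (pvCellA grid r c == 0) && !blocked_areas.contains (r, c) then
            let st1 := pvVSet st.1 r c
            let bs := bfs_loop grid blocked_areas (pvTotalA grid + 1) [(r, c)] st1 0
            (bs.1, st.2 ++ [bs.2])
          else st) st)
    (visited0, [])
  res.2

def has_enough_space (grid : List (List Int)) (blocked_areas : List (Int × Int)) (piece_areas : List Int) (index : Int) : Bool :=
  let remaining_areas := PySem.List.slice piece_areas (some index) none
  if remaining_areas.isEmpty then true
  else
    let smallest_area := (PySem.List.min? remaining_areas (fun x => x)).getD 0
    let regions := find_contiguous_regions grid blocked_areas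
    -- for size in regions: if 0 < size < smallest_area: return False
    if regions.any (fun size => decide (0 < size) && decide (size < smallest_area)) then false
    else true

-- ===== PORT B =====

-- [(r, c) for r, row in enumerate(grid) for c, v in enumerate(row)
--         if v == 0 and (r, c) not in blocked_areas]
def pvEmpties (grid : List (List Int)) (blocked_areas : List (Int × Int)) :
    List (Int × Int) :=
  (PySem.List.enumerate grid 0).flatMap (fun rr =>
    ((PySem.List.enumerate rr.2 0).filter
        (fun cv => (cv.2 == 0) && !blocked_areas.contains (rr.1, cv.1))).map
      (fun cv => (rr.1, cv.1)))

-- {(r + dr, c + dc) for (r, c) in comp for (dr, dc) in dirs} & cells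
def pvGrown (cells : PySem.Set (Int × Int)) (comp : PySem.Set (Int × Int)) :
    PySem.Set (Int × Int) :=
  PySem.Set.inter
    (PySem.Set.ofList (comp.flatMap (fun p =>
      [((1 : Int), (0 : Int)), (-1, 0), (0, 1), (0, -1)].map
        (fun d => (p.1 + d.1, p.2 + d.2)))))
    cells

-- the bounded `for _ in range(n): … break` saturation loop of Source B
def pvSatur (cells : PySem.Set (Int × Int)) :
    Nat → PySem.Set (Int × Int) → PySem.Set (Int × Int)
  | 0, comp => comp
  | fuel + 1, comp =>
    let grown := pvGrown cells comp
    if PySem.Set.issubset grown comp then comp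
    else pvSatur cells fuel (PySem.Set.union comp grown)

-- `for start in empties: … return False` / fall through to True
def pvScanB (cells : PySem.Set (Int × Int)) (n : Nat) (smallest : Int) :
    List (Int × Int) → Bool
  | [] => true
  | start :: rest =>
    let comp := pvSatur cells n (PySem.Set.ofList [start])
    if decide ((comp.length : Int) < smallest) then false
    else pvScanB cells n smallest rest

def has_enough_space_alt (grid : List (List Int)) (blocked_areas : List (Int × Int)) (piece_areas : List Int) (index : Int) : Bool :=
  let remaining_areas := PySem.List.slice piece_areas (some index) none
  if remaining_areas.isEmpty then true
  else
    let smallest_area := (PySem.List.min? remaining_areas (fun x => x)).getD 0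
    let empties := pvEmpties grid blocked_areas
    let cells := PySem.Set.ofList empties
    pvScanB cells empties.length smallest_area empties

-- ===== PRECONDITION & SPEC =====
def Spec_has_enough_space (grid : List (List Int)) (blocked_areas : List (Int × Int)) (piece_areas : List Int) (index : Int) (out : Bool) : Prop := out = has_enough_space_alt grid blocked_areas piece_areas index
instance (grid : List (List Int)) (blocked_areas : List (Int × Int)) (piece_areas : List Int) (index : Int) (out : Bool) : Decidable (Spec_has_enough_space grid blocked_areas piece_areas index out) := by unfold Spec_has_enough_space; infer_instance

-- ===== CLAIM (what is proved, stated in full; the proofs are below) =====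
def Claim_equal_has_enough_space : Prop := ∀ (grid : List (List Int)) (blocked_areas : List (Int × Int)) (piece_areas : List Int) (index : Int), Dom_has_enough_space grid blocked_areas piece_areas index → Spec_has_enough_space grid blocked_areas piece_areas index (has_enough_space grid blocked_areas piece_areas index)

-- ===== LEMMAS AND PROOFS =====

-- ---------- proof-side abstractions ----------

-- the four Python neighbour offsets applied to p
def pvNbrs (p : Int × Int) : List (Int × Int) :=
  [(p.1 + 1, p.2), (p.1 - 1, p.2), (p.1, p.2 + 1), (p.1, p.2 - 1)]

-- "empty reachable cell": in bounds, not blocked, grid value 0 (exactly A's cell test)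
def pvOkP (g : List (List Int)) (bl : List (Int × Int)) (p : Int × Int) : Bool :=
  is_valid g p.1 p.2 bl && (pvCellA g p.1 p.2 == 0)

def pvAdj (g : List (List Int)) (bl : List (Int × Int)) (a b : Int × Int) : Prop :=
  pvOkP g bl a = true ∧ pvOkP g bl b = true ∧ b ∈ pvNbrs a

def pvReach (g : List (List Int)) (bl : List (Int × Int)) : (Int × Int) → (Int × Int) → Prop :=
  Relation.ReflTransGen (pvAdj g bl)

-- all in-bounds coordinates, row-major
def pvCells (g : List (List Int)) : List (Int × Int) :=
  (PySem.List.pyRange 0 (g.length : Int) 1).flatMap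
    (fun r => (PySem.List.pyRange 0 ((pvRowA g r).length : Int) 1).map (fun c => (r, c)))

noncomputable def pvComp (g : List (List Int)) (bl : List (Int × Int)) (p : Int × Int) :
    Finset (Int × Int) :=
  @Finset.filter _ (fun y => pvReach g bl p y) (fun _ => Classical.propDecidable _)
    (pvCells g).toFinset

-- visited-matrix abstractions
def pvShape (g : List (List Int)) (v : List (List Bool)) : Prop :=
  v.map List.length = g.map List.length

noncomputable def pvW (g : List (List Int)) (v : List (List Bool)) : Finset (Int × Int) :=
  ((pvCells g).filter (fun a => pvVGet v a.1 a.2)).toFinset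

-- ---------- basic lemmas ----------

lemma pvRowA_natCast (g : List (List Int)) (n : Nat) :
    pvRowA g (n : Int) = (g[n]?).getD [] := by
  simp [pvRowA]

lemma pv_mem_pvCells (g : List (List Int)) (a : Int × Int) :
    a ∈ pvCells g ↔ 0 ≤ a.1 ∧ a.1 < (g.length : Int) ∧ 0 ≤ a.2 ∧
      a.2 < ((pvRowA g a.1).length : Int) := by
  simp only [pvCells, List.mem_flatMap, List.mem_map, PySem.List.mem_pyRange_one]
  constructor
  · rintro ⟨r, hr, c, hc, rfl⟩
    exact ⟨hr.1, hr.2, hc.1, hc.2⟩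
  · rintro ⟨h1, h2, h3, h4⟩
    exact ⟨a.1, ⟨h1, h2⟩, a.2, ⟨h3, h4⟩, rfl⟩

lemma pvCells_length (g : List (List Int)) : (pvCells g).length = pvTotalA g := by
  have hmap : ∀ (n : Nat), n ≤ g.length → ∀ (k : Nat), k + n = g.length →
      ((PySem.List.pyRange (k : Int) (g.length : Int) 1).map
        (fun r => ((PySem.List.pyRange 0 ((pvRowA g r).length : Int) 1).map
          (fun c => (r, c))).length)).sum = ((g.drop k).map List.length).sum := by
    intro n
    induction n with
    | zero =>
        intro _ k hk
        rw [PySem.List.pyRange_one_eq_nil (by omega), List.drop_of_length_le (by omega)]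
        simp
    | succ m ih =>
        intro hn k hk
        rw [PySem.List.pyRange_one_cons (by omega),
            show ((k : Int) + 1) = ((k + 1 : Nat) : Int) by push_cast; ring]
        have hd : g.drop k = g[k] :: g.drop (k + 1) := List.drop_eq_getElem_cons (by omega)
        rw [List.map_cons, List.sum_cons, hd, List.map_cons, List.sum_cons,
            ih (by omega) (k + 1) (by omega)]
        have hk2 : k < g.length := by omega
        simp only [List.length_map, PySem.List.length_pyRange_one, pvRowA_natCast,
          List.getElem?_eq_getElem hk2, Option.getD_some]
        omega
  simp only [pvCells, List.length_flatMap]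
  have h0 := hmap g.length le_rfl 0 (by omega)
  simp only [Nat.cast_zero, List.drop_zero] at h0
  simpa [pvTotalA] using h0

lemma pvOkP_mem_pvCells {g : List (List Int)} {bl : List (Int × Int)} {p : Int × Int}
    (h : pvOkP g bl p = true) : p ∈ pvCells g := by
  rw [pvOkP, Bool.and_eq_true] at h
  have hv := h.1
  rw [is_valid] at hv
  split_ifs at hv with h1 h2 h3
  simp only [Bool.or_eq_true, decide_eq_true_eq, not_or] at h1 h2
  exact (pv_mem_pvCells g p).mpr ⟨by omega, by omega, by omega, by omega⟩

lemma pvNbrs_symm (a b : Int × Int) : a ∈ pvNbrs b ↔ b ∈ pvNbrs a := by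
  simp only [pvNbrs, List.mem_cons, List.not_mem_nil, or_false, Prod.ext_iff]
  omega

lemma pvAdj_symm (g : List (List Int)) (bl : List (Int × Int)) :
    Symmetric (pvAdj g bl) := by
  intro a b ⟨ha, hb, hn⟩
  exact ⟨hb, ha, (pvNbrs_symm a b).mpr hn⟩

lemma pvReach_symm {g : List (List Int)} {bl : List (Int × Int)} {a b : Int × Int}
    (h : pvReach g bl a b) : pvReach g bl b a :=
  (Relation.ReflTransGen.symmetric (pvAdj_symm g bl)) h

lemma pvReach_ok {g : List (List Int)} {bl : List (Int × Int)} {a b : Int × Int}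
    (ha : pvOkP g bl a = true) (h : pvReach g bl a b) : pvOkP g bl b = true := by
  induction h with
  | refl => exact ha
  | tail _ hadj _ => exact hadj.2.1

lemma pv_mem_pvComp {g : List (List Int)} {bl : List (Int × Int)} {p y : Int × Int} :
    y ∈ pvComp g bl p ↔ y ∈ pvCells g ∧ pvReach g bl p y := by
  simp [pvComp, Finset.mem_filter, List.mem_toFinset]

lemma pvComp_eq_of_reach {g : List (List Int)} {bl : List (Int × Int)} {p q : Int × Int}
    (h : pvReach g bl p q) : pvComp g bl p = pvComp g bl q := by
  apply Finset.ext
  intro y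
  rw [pv_mem_pvComp, pv_mem_pvComp]
  exact ⟨fun ⟨hc, hr⟩ => ⟨hc, Relation.ReflTransGen.trans (pvReach_symm h) hr⟩,
         fun ⟨hc, hr⟩ => ⟨hc, Relation.ReflTransGen.trans h hr⟩⟩

lemma pv_self_mem_pvComp {g : List (List Int)} {bl : List (Int × Int)} {p : Int × Int}
    (h : pvOkP g bl p = true) : p ∈ pvComp g bl p :=
  pv_mem_pvComp.mpr ⟨pvOkP_mem_pvCells h, Relation.ReflTransGen.refl⟩

lemma pvComp_card_pos {g : List (List Int)} {bl : List (Int × Int)} {p : Int × Int}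
    (h : pvOkP g bl p = true) : 0 < (pvComp g bl p).card :=
  Finset.card_pos.mpr ⟨p, pv_self_mem_pvComp h⟩

lemma pvOkP_iff (g : List (List Int)) (bl : List (Int × Int)) (p : Int × Int) :
    pvOkP g bl p = true ↔
      (0 ≤ p.1 ∧ p.1 < (g.length : Int) ∧ 0 ≤ p.2 ∧ p.2 < ((pvRowA g p.1).length : Int)) ∧
      pvCellA g p.1 p.2 = 0 ∧ bl.contains p = false := by
  rw [pvOkP, Bool.and_eq_true, beq_iff_eq, is_valid]
  constructor
  · rintro ⟨hv, hc⟩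
    split_ifs at hv with h1 h2 h3
    simp only [Bool.or_eq_true, decide_eq_true_eq, not_or] at h1 h2
    refine ⟨⟨by omega, by omega, by omega, by omega⟩, hc, ?_⟩
    cases hb : bl.contains (p.1, p.2) with
    | false => simpa using hb
    | true => exact absurd hb h3
  · rintro ⟨⟨h1, h2, h3, h4⟩, hc, hb⟩
    refine ⟨?_, hc⟩
    rw [if_neg (by simp only [Bool.or_eq_true, decide_eq_true_eq]; omega),
        if_neg (by simp only [Bool.or_eq_true, decide_eq_true_eq]; omega),
        if_neg (by simpa using hb)]

-- ---------- visited-matrix lemmas ----------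

lemma pvVGet_nonneg (v : List (List Bool)) {r c : Int} (hr : 0 ≤ r) (hc : 0 ≤ c) :
    pvVGet v r c = (((v[r.toNat]?).getD [])[c.toNat]?).getD false := by
  rw [pvVGet, PySem.List.pyGet?_of_nonneg _ hr, PySem.List.pyGet?_of_nonneg _ hc]

lemma pvShape_init (g : List (List Int)) :
    pvShape g (g.map (fun row => List.replicate row.length false)) := by
  simp [pvShape, Function.comp]

lemma pvVGet_init (g : List (List Int)) (r c : Int) :
    pvVGet (g.map (fun row => List.replicate row.length false)) r c = false := by
  rw [pvVGet]
  rcases h : PySem.List.pyGet? (g.map (fun row => List.replicate row.length false)) r with _ | row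
  · rcases h2 : PySem.List.pyGet? ([] : List Bool) c with _ | b
    · simp [h, h2]
    · exact absurd (PySem.List.mem_of_pyGet?_eq_some _ h2) (by simp)
  · have hrow := PySem.List.mem_of_pyGet?_eq_some _ h
    simp only [List.mem_map] at hrow
    obtain ⟨w, _, rfl⟩ := hrow
    rcases h2 : PySem.List.pyGet? (List.replicate w.length false) c with _ | b
    · simp [h, h2]
    · have hb := PySem.List.mem_of_pyGet?_eq_some _ h2
      simp [h, h2, List.eq_of_mem_replicate hb]

lemma pvShape_vset {g : List (List Int)} {v : List (List Bool)} (hsh : pvShape g v)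
    (r c : Int) : pvShape g (pvVSet v r c) := by
  rw [pvShape, pvVSet, ← hsh]
  apply List.ext_getElem?
  intro i
  simp only [List.getElem?_map, List.getElem?_modify]
  cases v[i]? with
  | none => simp
  | some row => simp only [Option.map_some]; split <;> simp

lemma pvShape_length {g : List (List Int)} {v : List (List Bool)} (hsh : pvShape g v) :
    v.length = g.length := by
  have := congrArg List.length hsh; simpa using this

lemma pvShape_rowlen {g : List (List Int)} {v : List (List Bool)} (hsh : pvShape g v)
    {n : Nat} (hn : n < g.length) :
    ((v[n]?).getD []).length = (pvRowA g (n : Int)).length := by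
  have hlen := pvShape_length hsh
  have h1 : (v.map List.length)[n]? = (g.map List.length)[n]? := by rw [hsh]
  rw [List.getElem?_map, List.getElem?_map,
      List.getElem?_eq_getElem (by omega : n < v.length),
      List.getElem?_eq_getElem hn] at h1
  simp only [Option.map_some, Option.some.injEq] at h1
  rw [List.getElem?_eq_getElem (by omega : n < v.length), pvRowA_natCast,
      List.getElem?_eq_getElem hn]
  simpa using h1

lemma pvVGet_vset {g : List (List Int)} {v : List (List Bool)} (hsh : pvShape g v)
    {a : Int × Int} (ha : a ∈ pvCells g) {b : Int × Int} (hb : b ∈ pvCells g) :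
    pvVGet (pvVSet v a.1 a.2) b.1 b.2 = true ↔ b = a ∨ pvVGet v b.1 b.2 = true := by
  obtain ⟨ha1, ha2, ha3, ha4⟩ := (pv_mem_pvCells g a).mp ha
  obtain ⟨hb1, hb2, hb3, hb4⟩ := (pv_mem_pvCells g b).mp hb
  have hlen : v.length = g.length := pvShape_length hsh
  have hb1v : b.1.toNat < v.length := by omega
  rw [pvVGet_nonneg _ hb1 hb3, pvVGet_nonneg _ hb1 hb3, pvVSet, List.getElem?_modify,
      List.getElem?_eq_getElem hb1v]
  have hrow : (v[b.1.toNat]).length = (pvRowA g b.1).length := by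
    have h2 := pvShape_rowlen hsh (n := b.1.toNat) (by omega)
    rw [List.getElem?_eq_getElem hb1v] at h2
    simpa [show ((b.1.toNat : Int)) = b.1 by omega] using h2
  by_cases hr : a.1.toNat = b.1.toNat
  · have hab1 : a.1 = b.1 := by omega
    simp only [Option.map_eq_map, Option.map_some, Option.getD_some, if_pos hr,
      List.getElem?_set]
    by_cases hc : a.2.toNat = b.2.toNat
    · have hab2 : a.2 = b.2 := by omega
      have hlt : a.2.toNat < (v[b.1.toNat]).length := by
        have h3 : a.2 < ((pvRowA g b.1).length : Int) := hab1 ▸ ha4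
        omega
      simp only [if_pos hc, if_pos hlt, Option.getD_some, true_iff]
      exact Or.inl (Prod.ext_iff.mpr ⟨hab1.symm, hab2.symm⟩)
    · have hne : b ≠ a := by
        intro he; exact hc (by rw [he])
      simp [hc, hne]
  · have hne : b ≠ a := by
      intro he; exact hr (by rw [he])
    simp only [Option.map_eq_map, Option.map_some, Option.getD_some, if_neg hr]
    simp [hne]

lemma pv_mem_pvW {g : List (List Int)} {v : List (List Bool)} {a : Int × Int} :
    a ∈ pvW g v ↔ a ∈ pvCells g ∧ pvVGet v a.1 a.2 = true := by
  simp [pvW, List.mem_toFinset]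

lemma pvW_card_le_cells (g : List (List Int)) (v : List (List Bool)) :
    (pvW g v).card ≤ (pvCells g).toFinset.card := by
  apply Finset.card_le_card
  intro z hz
  rw [pv_mem_pvW] at hz
  exact List.mem_toFinset.mpr hz.1

-- ---------- A-side: the direction fold and the BFS loop ----------

def pvStepA (g : List (List Int)) (bl : List (Int × Int))
    (st : List (List Bool) × List (Int × Int)) (nb : Int × Int) :
    List (List Bool) × List (Int × Int) :=
  if is_valid g nb.1 nb.2 bl && (!pvVGet st.1 nb.1 nb.2 && (pvCellA g nb.1 nb.2 == 0)) then
    (pvVSet st.1 nb.1 nb.2, st.2 ++ [nb])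
  else st

lemma pv_fold_eq (g : List (List Int)) (bl : List (Int × Int)) (x y : Int)
    (v : List (List Bool)) (rest : List (Int × Int)) :
    ([((1 : Int), (0 : Int)), (-1, 0), (0, 1), (0, -1)].foldl
      (fun (st : List (List Bool) × List (Int × Int)) d =>
        let nb := (x + d.1, y + d.2)
        if is_valid g nb.1 nb.2 bl &&
           (!pvVGet st.1 nb.1 nb.2 && (pvCellA g nb.1 nb.2 == 0)) then
          (pvVSet st.1 nb.1 nb.2, st.2 ++ [nb])
        else st) (v, rest))
    = (pvNbrs (x, y)).foldl (pvStepA g bl) (v, rest) := by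
  simp only [pvNbrs, pvStepA, List.foldl_cons, List.foldl_nil, add_zero, sub_eq_add_neg]

lemma pvFoldA (g : List (List Int)) (bl : List (Int × Int)) (nbs : List (Int × Int)) :
    ∀ (v : List (List Bool)) (rest : List (Int × Int)), pvShape g v →
    ∃ (news : List (Int × Int)) (v' : List (List Bool)),
      nbs.foldl (pvStepA g bl) (v, rest) = (v', rest ++ news) ∧ pvShape g v' ∧
      news.Nodup ∧
      (∀ b, b ∈ news ↔ pvOkP g bl b = true ∧ pvVGet v b.1 b.2 ≠ true ∧ b ∈ nbs) ∧
      (∀ b ∈ pvCells g, (pvVGet v' b.1 b.2 = true ↔ pvVGet v b.1 b.2 = true ∨ b ∈ news)) := by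
  induction nbs with
  | nil =>
    intro v rest hsh
    exact ⟨[], v, by simp, hsh, List.nodup_nil, by simp, by simp⟩
  | cons nb tl ih =>
    intro v rest hsh
    rw [List.foldl_cons]
    by_cases hcond : (is_valid g nb.1 nb.2 bl &&
        (!pvVGet v nb.1 nb.2 && (pvCellA g nb.1 nb.2 == 0))) = true
    · have hok : pvOkP g bl nb = true := by
        rw [Bool.and_eq_true, Bool.and_eq_true] at hcond
        simp only [pvOkP, Bool.and_eq_true]
        exact ⟨hcond.1, hcond.2.2⟩
      have hnm : pvVGet v nb.1 nb.2 ≠ true := by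
        rw [Bool.and_eq_true, Bool.and_eq_true, Bool.not_eq_true'] at hcond
        simp [hcond.2.1]
      have hmem : nb ∈ pvCells g := pvOkP_mem_pvCells hok
      have hstep : pvStepA g bl (v, rest) nb = (pvVSet v nb.1 nb.2, rest ++ [nb]) := by
        simp [pvStepA, hcond]
      rw [hstep]
      have hsh1 : pvShape g (pvVSet v nb.1 nb.2) := pvShape_vset hsh _ _
      obtain ⟨news, v', heq, hsh', hnd, hch, hev⟩ := ih (pvVSet v nb.1 nb.2) (rest ++ [nb]) hsh1
      have hvset : ∀ b ∈ pvCells g,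
          (pvVGet (pvVSet v nb.1 nb.2) b.1 b.2 = true ↔ b = nb ∨ pvVGet v b.1 b.2 = true) :=
        fun b hb => pvVGet_vset hsh hmem hb
      have hself : pvVGet (pvVSet v nb.1 nb.2) nb.1 nb.2 = true :=
        (hvset nb hmem).mpr (Or.inl rfl)
      have hnbnotin : nb ∉ news := by
        intro hn
        exact ((hch nb).mp hn).2.1 hself
      refine ⟨nb :: news, v', by rw [heq]; simp, hsh',
        List.nodup_cons.mpr ⟨hnbnotin, hnd⟩, ?_, ?_⟩
      · intro b
        rw [List.mem_cons, hch b]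
        constructor
        · rintro (rfl | ⟨h1, h2, h3⟩)
          · exact ⟨hok, hnm, List.mem_cons.mpr (Or.inl rfl)⟩
          · refine ⟨h1, ?_, List.mem_cons.mpr (Or.inr h3)⟩
            intro hv
            exact h2 ((hvset b (pvOkP_mem_pvCells h1)).mpr (Or.inr hv))
        · rintro ⟨h1, h2, h3⟩
          rcases List.mem_cons.mp h3 with rfl | h4
          · exact Or.inl rfl
          · by_cases hbn : b = nb
            · exact Or.inl hbn
            · refine Or.inr ⟨h1, ?_, h4⟩
              intro hv
              rcases (hvset b (pvOkP_mem_pvCells h1)).mp hv with h | h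
              · exact hbn h
              · exact h2 h
      · intro b hb
        rw [hev b hb, hvset b hb, List.mem_cons]
        tauto
    · have hstep : pvStepA g bl (v, rest) nb = (v, rest) := by
        simp only [pvStepA]
        rw [if_neg (by simpa using hcond)]
      rw [hstep]
      obtain ⟨news, v', heq, hsh', hnd, hch, hev⟩ := ih v rest hsh
      have hno : ¬ (pvOkP g bl nb = true ∧ pvVGet v nb.1 nb.2 ≠ true) := by
        rintro ⟨h1, h2⟩
        rw [pvOkP, Bool.and_eq_true] at h1
        apply hcond
        rw [Bool.and_eq_true, Bool.and_eq_true, Bool.not_eq_true']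
        exact ⟨h1.1, by revert h2; cases pvVGet v nb.1 nb.2 <;> simp, h1.2⟩
      refine ⟨news, v', heq, hsh', hnd, ?_, hev⟩
      intro b
      rw [hch b, List.mem_cons]
      constructor
      · rintro ⟨h1, h2, h3⟩; exact ⟨h1, h2, Or.inr h3⟩
      · rintro ⟨h1, h2, (rfl | h3)⟩
        · exact absurd ⟨h1, h2⟩ hno
        · exact ⟨h1, h2, h3⟩

lemma pvW_vnew (g : List (List Int)) {v v' : List (List Bool)} {news : List (Int × Int)}
    (hnd : news.Nodup) (hsub : ∀ b ∈ news, b ∈ pvCells g)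
    (hfresh : ∀ b ∈ news, pvVGet v b.1 b.2 ≠ true)
    (hev : ∀ b ∈ pvCells g, (pvVGet v' b.1 b.2 = true ↔ pvVGet v b.1 b.2 = true ∨ b ∈ news)) :
    (pvW g v').card = (pvW g v).card + news.length := by
  have hunion : pvW g v' = pvW g v ∪ news.toFinset := by
    apply Finset.ext; intro z
    rw [Finset.mem_union, pv_mem_pvW, pv_mem_pvW, List.mem_toFinset]
    constructor
    · rintro ⟨hc, hv⟩
      rcases (hev z hc).mp hv with h | h
      · exact Or.inl ⟨hc, h⟩
      · exact Or.inr h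
    · rintro (⟨hc, hv⟩ | h)
      · exact ⟨hc, (hev z hc).mpr (Or.inl hv)⟩
      · exact ⟨hsub z h, (hev z (hsub z h)).mpr (Or.inr h)⟩
  have hdis : Disjoint (pvW g v) news.toFinset := by
    rw [Finset.disjoint_left]
    rintro z hz hz2
    rw [pv_mem_pvW] at hz
    exact hfresh z (List.mem_toFinset.mp hz2) hz.2
  rw [hunion, Finset.card_union_of_disjoint hdis, List.toFinset_card_of_nodup hnd]

lemma pvBfs (g : List (List Int)) (bl : List (Int × Int)) :
    ∀ (fuel : Nat) (queue : List (Int × Int)) (v : List (List Bool)) (size : Int),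
    pvShape g v →
    (∀ q ∈ queue, pvOkP g bl q = true ∧ pvVGet v q.1 q.2 = true) →
    queue.Nodup →
    (∀ a, pvOkP g bl a = true → pvVGet v a.1 a.2 = true → a ∉ queue →
        ∀ b, pvAdj g bl a b → pvVGet v b.1 b.2 = true) →
    (pvCells g).toFinset.card + queue.length ≤ fuel + (pvW g v).card →
    pvShape g (bfs_loop g bl fuel queue v size).1 ∧
    (∀ b ∈ pvCells g, (pvVGet (bfs_loop g bl fuel queue v size).1 b.1 b.2 = true ↔
        pvVGet v b.1 b.2 = true ∨ ∃ q ∈ queue, pvReach g bl q b)) ∧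
    (bfs_loop g bl fuel queue v size).2 =
      size + (queue.length : Int) +
        (((pvW g (bfs_loop g bl fuel queue v size).1).card : Int) -
          ((pvW g v).card : Int)) ∧
    (∀ a, pvOkP g bl a = true → pvVGet (bfs_loop g bl fuel queue v size).1 a.1 a.2 = true →
        ∀ b, pvAdj g bl a b → pvVGet (bfs_loop g bl fuel queue v size).1 b.1 b.2 = true) := by
  intro fuel
  induction fuel with
  | zero =>
    intro queue v size hsh hq hnd hcl hfuel
    have hW := pvW_card_le_cells g v
    have hqe : queue = [] := List.eq_nil_of_length_eq_zero (by omega)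
    subst hqe
    have hred : bfs_loop g bl 0 [] v size = (v, size) := rfl
    rw [hred]
    exact ⟨hsh, fun b hb => by simp, by simp,
      fun a ha hv b hb => hcl a ha hv (by simp) b hb⟩
  | succ fuel ih =>
    intro queue v size hsh hq hnd hcl hfuel
    match queue with
    | [] =>
      have hred : bfs_loop g bl (fuel + 1) [] v size = (v, size) := rfl
      rw [hred]
      exact ⟨hsh, fun b hb => by simp, by simp,
        fun a ha hv b hb => hcl a ha hv (by simp) b hb⟩
    | (x, y) :: rest =>
      have hxy := hq (x, y) (List.mem_cons.mpr (Or.inl rfl))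
      obtain ⟨news, v', heq, hsh', hnwnd, hch, hev⟩ := pvFoldA g bl (pvNbrs (x, y)) v rest hsh
      have hred2 : bfs_loop g bl (fuel + 1) ((x, y) :: rest) v size =
          bfs_loop g bl fuel (rest ++ news) v' (size + 1) := by
        conv_lhs => rw [bfs_loop]
        rw [pv_fold_eq, heq]
      rw [hred2]
      have hq' : ∀ q ∈ rest ++ news, pvOkP g bl q = true ∧ pvVGet v' q.1 q.2 = true := by
        intro q hqm
        rcases List.mem_append.mp hqm with h | h
        · have h2 := hq q (List.mem_cons.mpr (Or.inr h))
          exact ⟨h2.1, (hev q (pvOkP_mem_pvCells h2.1)).mpr (Or.inl h2.2)⟩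
        · have h2 := (hch q).mp h
          exact ⟨h2.1, (hev q (pvOkP_mem_pvCells h2.1)).mpr (Or.inr h)⟩
      have hnd' : (rest ++ news).Nodup := by
        rw [List.nodup_append]
        refine ⟨(List.nodup_cons.mp hnd).2, hnwnd, ?_⟩
        intro a haR b hbN hab
        subst hab
        exact ((hch a).mp hbN).2.1 (hq a (List.mem_cons.mpr (Or.inr haR))).2
      have hcl' : ∀ a, pvOkP g bl a = true → pvVGet v' a.1 a.2 = true → a ∉ rest ++ news →
          ∀ b, pvAdj g bl a b → pvVGet v' b.1 b.2 = true := by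
        intro a hok hv hnin b hadj
        have hacell := pvOkP_mem_pvCells hok
        have hbcell := pvOkP_mem_pvCells hadj.2.1
        have hvv : pvVGet v a.1 a.2 = true := by
          rcases (hev a hacell).mp hv with h | h
          · exact h
          · exact absurd (List.mem_append.mpr (Or.inr h)) hnin
        by_cases hax : a = (x, y)
        · subst hax
          by_cases hbv : pvVGet v b.1 b.2 = true
          · exact (hev b hbcell).mpr (Or.inl hbv)
          · have hbnews : b ∈ news := (hch b).mpr ⟨hadj.2.1, hbv, hadj.2.2⟩
            exact (hev b hbcell).mpr (Or.inr hbnews)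
        · have hnq : a ∉ (x, y) :: rest := by
            simp only [List.mem_cons, not_or]
            exact ⟨hax, fun h => hnin (List.mem_append.mpr (Or.inl h))⟩
          exact (hev b hbcell).mpr (Or.inl (hcl a hok hvv hnq b hadj))
      have hcard : (pvW g v').card = (pvW g v).card + news.length :=
        pvW_vnew g hnwnd (fun b hb => pvOkP_mem_pvCells ((hch b).mp hb).1)
          (fun b hb => ((hch b).mp hb).2.1) hev
      have hfuel' : (pvCells g).toFinset.card + (rest ++ news).length ≤
          fuel + (pvW g v').card := by
        rw [List.length_append, hcard]
        simp only [List.length_cons] at hfuel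
        omega
      obtain ⟨ihsh, ihc1, ihc2, ihc3⟩ := ih (rest ++ news) v' (size + 1) hsh' hq' hnd' hcl' hfuel'
      have hfinalReach : ∀ q, pvOkP g bl q = true →
          pvVGet (bfs_loop g bl fuel (rest ++ news) v' (size + 1)).1 q.1 q.2 = true →
          ∀ b, pvReach g bl q b →
          pvVGet (bfs_loop g bl fuel (rest ++ news) v' (size + 1)).1 b.1 b.2 = true := by
        intro q hok hqv b hr
        induction hr with
        | refl => exact hqv
        | @tail m b2 hr' hadj ih2 => exact ihc3 m hadj.1 ih2 b2 hadj
      refine ⟨ihsh, ?_, ?_, ihc3⟩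
      · intro b hb
        constructor
        · intro hfin
          rcases (ihc1 b hb).mp hfin with hv' | ⟨q, hqm, hr⟩
          · rcases (hev b hb).mp hv' with h | h
            · exact Or.inl h
            · have hc := (hch b).mp h
              exact Or.inr ⟨(x, y), List.mem_cons.mpr (Or.inl rfl),
                Relation.ReflTransGen.single ⟨hxy.1, hc.1, hc.2.2⟩⟩
          · rcases List.mem_append.mp hqm with h | h
            · exact Or.inr ⟨q, List.mem_cons.mpr (Or.inr h), hr⟩
            · have hc := (hch q).mp h
              exact Or.inr ⟨(x, y), List.mem_cons.mpr (Or.inl rfl),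
                Relation.ReflTransGen.trans
                  (Relation.ReflTransGen.single ⟨hxy.1, hc.1, hc.2.2⟩) hr⟩
        · intro hpre
          rcases hpre with hv | ⟨q, hqm, hr⟩
          · exact (ihc1 b hb).mpr (Or.inl ((hev b hb).mpr (Or.inl hv)))
          · have hqok : pvOkP g bl q = true := (hq q hqm).1
            have hqv' : pvVGet v' q.1 q.2 = true :=
              (hev q (pvOkP_mem_pvCells hqok)).mpr (Or.inl (hq q hqm).2)
            have hqfin : pvVGet (bfs_loop g bl fuel (rest ++ news) v' (size + 1)).1 q.1 q.2 = true :=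
              (ihc1 q (pvOkP_mem_pvCells hqok)).mpr (Or.inl hqv')
            exact hfinalReach q hqok hqfin b hr
      · rw [ihc2]
        have h1 : ((pvW g v').card : Int) = ((pvW g v).card : Int) + news.length := by
          exact_mod_cast hcard
        simp only [List.length_append, List.length_cons]
        push_cast
        omega

-- ---------- A-side: the outer double loop as one fold over pvCells ----------

def pvCellStep (g : List (List Int)) (bl : List (Int × Int))
    (st : List (List Bool) × List Int) (p : Int × Int) : List (List Bool) × List Int :=
  if !pvVGet st.1 p.1 p.2 && (pvCellA g p.1 p.2 == 0) && !bl.contains p then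
    let st1 := pvVSet st.1 p.1 p.2
    let bs := bfs_loop g bl (pvTotalA g + 1) [p] st1 0
    (bs.1, st.2 ++ [bs.2])
  else st

lemma pv_find_eq_foldl (g : List (List Int)) (bl : List (Int × Int)) :
    find_contiguous_regions g bl =
      ((pvCells g).foldl (pvCellStep g bl)
        (g.map (fun row => List.replicate row.length false), ([] : List Int))).2 := by
  rw [find_contiguous_regions, pvCells, List.foldl_flatMap]
  simp only [List.foldl_map]
  rfl

lemma pvClosed_reach {g : List (List Int)} {bl : List (Int × Int)} {v : List (List Bool)}
    (hcl : ∀ a, pvOkP g bl a = true → pvVGet v a.1 a.2 = true →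
        ∀ b, pvAdj g bl a b → pvVGet v b.1 b.2 = true)
    {a b : Int × Int} (hr : pvReach g bl a b) (hva : pvVGet v a.1 a.2 = true) :
    pvVGet v b.1 b.2 = true := by
  induction hr with
  | refl => exact hva
  | tail _ hadj ih => exact hcl _ hadj.1 ih _ hadj

lemma pvCond_iff (g : List (List Int)) (bl : List (Int × Int)) (v : List (List Bool))
    {p : Int × Int} (hpc : p ∈ pvCells g) :
    ((!pvVGet v p.1 p.2 && (pvCellA g p.1 p.2 == 0) && !bl.contains p) = true) ↔
      (pvVGet v p.1 p.2 ≠ true ∧ pvOkP g bl p = true) := by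
  obtain ⟨h1, h2, h3, h4⟩ := (pv_mem_pvCells g p).mp hpc
  rw [pvOkP_iff]
  simp only [Bool.and_eq_true, Bool.not_eq_true', beq_iff_eq]
  constructor
  · rintro ⟨⟨hv, hc⟩, hb⟩
    exact ⟨by simp [hv], ⟨⟨h1, h2, h3, h4⟩, hc, by simpa using hb⟩⟩
  · rintro ⟨hv, ⟨_, hc, hb⟩⟩
    exact ⟨⟨by simpa using hv, hc⟩, by simpa using hb⟩

-- one outer-loop step that actually starts a BFS
lemma pvStep_bfs (g : List (List Int)) (bl : List (Int × Int)) {v : List (List Bool)}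
    {p : Int × Int} (hok : pvOkP g bl p = true) (hnv : pvVGet v p.1 p.2 ≠ true)
    (hsh : pvShape g v)
    (hcl : ∀ a, pvOkP g bl a = true → pvVGet v a.1 a.2 = true →
        ∀ b, pvAdj g bl a b → pvVGet v b.1 b.2 = true) :
    pvShape g (bfs_loop g bl (pvTotalA g + 1) [p] (pvVSet v p.1 p.2) 0).1 ∧
    (∀ b ∈ pvCells g,
      (pvVGet (bfs_loop g bl (pvTotalA g + 1) [p] (pvVSet v p.1 p.2) 0).1 b.1 b.2 = true ↔
        pvVGet v b.1 b.2 = true ∨ pvReach g bl p b)) ∧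
    (bfs_loop g bl (pvTotalA g + 1) [p] (pvVSet v p.1 p.2) 0).2 =
      ((pvComp g bl p).card : Int) ∧
    (∀ a, pvOkP g bl a = true →
      pvVGet (bfs_loop g bl (pvTotalA g + 1) [p] (pvVSet v p.1 p.2) 0).1 a.1 a.2 = true →
      ∀ b, pvAdj g bl a b →
        pvVGet (bfs_loop g bl (pvTotalA g + 1) [p] (pvVSet v p.1 p.2) 0).1 b.1 b.2 = true) := by
  have hpc : p ∈ pvCells g := pvOkP_mem_pvCells hok
  have hsh1 : pvShape g (pvVSet v p.1 p.2) := pvShape_vset hsh _ _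
  have hvset : ∀ b ∈ pvCells g,
      (pvVGet (pvVSet v p.1 p.2) b.1 b.2 = true ↔ b = p ∨ pvVGet v b.1 b.2 = true) :=
    fun b hb => pvVGet_vset hsh hpc hb
  have hWset : pvW g (pvVSet v p.1 p.2) = insert p (pvW g v) := by
    apply Finset.ext; intro z
    rw [pv_mem_pvW, Finset.mem_insert, pv_mem_pvW]
    constructor
    · rintro ⟨hc, hv⟩
      rcases (hvset z hc).mp hv with rfl | h
      · exact Or.inl rfl
      · exact Or.inr ⟨hc, h⟩
    · rintro (rfl | ⟨hc, hv⟩)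
      · exact ⟨hpc, (hvset z hpc).mpr (Or.inl rfl)⟩
      · exact ⟨hc, (hvset z hc).mpr (Or.inr hv)⟩
  have hpW : p ∉ pvW g v := by
    intro h
    exact hnv (pv_mem_pvW.mp h).2
  have hq : ∀ q ∈ [p], pvOkP g bl q = true ∧ pvVGet (pvVSet v p.1 p.2) q.1 q.2 = true := by
    intro q hq
    rcases List.mem_singleton.mp hq with rfl
    exact ⟨hok, (hvset q hpc).mpr (Or.inl rfl)⟩
  have hcl1 : ∀ a, pvOkP g bl a = true → pvVGet (pvVSet v p.1 p.2) a.1 a.2 = true →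
      a ∉ [p] → ∀ b, pvAdj g bl a b → pvVGet (pvVSet v p.1 p.2) b.1 b.2 = true := by
    intro a hoka hva hnin b hadj
    have hac := pvOkP_mem_pvCells hoka
    have hbc := pvOkP_mem_pvCells hadj.2.1
    rcases (hvset a hac).mp hva with rfl | hva2
    · exact absurd (List.mem_singleton.mpr rfl) hnin
    · exact (hvset b hbc).mpr (Or.inr (hcl a hoka hva2 b hadj))
  have hfuel : (pvCells g).toFinset.card + ([p] : List (Int × Int)).length ≤
      (pvTotalA g + 1) + (pvW g (pvVSet v p.1 p.2)).card := by
    have h1 : (pvCells g).toFinset.card ≤ (pvCells g).length := List.toFinset_card_le _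
    rw [pvCells_length] at h1
    simp only [List.length_singleton]
    omega
  obtain ⟨bsh, bch, bsz, bcl⟩ := pvBfs g bl (pvTotalA g + 1) [p] (pvVSet v p.1 p.2) 0
    hsh1 hq (List.nodup_singleton p) hcl1 hfuel
  have hch2 : ∀ b ∈ pvCells g,
      (pvVGet (bfs_loop g bl (pvTotalA g + 1) [p] (pvVSet v p.1 p.2) 0).1 b.1 b.2 = true ↔
        pvVGet v b.1 b.2 = true ∨ pvReach g bl p b) := by
    intro b hb
    rw [bch b hb]
    constructor
    · rintro (hv | ⟨q, hqm, hr⟩)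
      · rcases (hvset b hb).mp hv with rfl | h
        · exact Or.inr Relation.ReflTransGen.refl
        · exact Or.inl h
      · rcases List.mem_singleton.mp hqm with rfl
        exact Or.inr hr
    · rintro (hv | hr)
      · exact Or.inl ((hvset b hb).mpr (Or.inr hv))
      · exact Or.inr ⟨p, List.mem_singleton.mpr rfl, hr⟩
  refine ⟨bsh, hch2, ?_, bcl⟩
  -- size arithmetic
  have hdisj : Disjoint (pvW g v) (pvComp g bl p) := by
    rw [Finset.disjoint_left]
    intro z hz hzc
    have hr : pvReach g bl p z := (pv_mem_pvComp.mp hzc).2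
    have : pvVGet v p.1 p.2 = true :=
      pvClosed_reach hcl (pvReach_symm hr) (pv_mem_pvW.mp hz).2
    exact hnv this
  have hWfin : pvW g (bfs_loop g bl (pvTotalA g + 1) [p] (pvVSet v p.1 p.2) 0).1 =
      pvW g v ∪ pvComp g bl p := by
    apply Finset.ext; intro z
    rw [pv_mem_pvW, Finset.mem_union, pv_mem_pvW, pv_mem_pvComp]
    constructor
    · rintro ⟨hc, hv⟩
      rcases (hch2 z hc).mp hv with h | h
      · exact Or.inl ⟨hc, h⟩
      · exact Or.inr ⟨hc, h⟩
    · rintro (⟨hc, hv⟩ | ⟨hc, hr⟩)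
      · exact ⟨hc, (hch2 z hc).mpr (Or.inl hv)⟩
      · exact ⟨hc, (hch2 z hc).mpr (Or.inr hr)⟩
  have hc1 : (pvW g (bfs_loop g bl (pvTotalA g + 1) [p] (pvVSet v p.1 p.2) 0).1).card =
      (pvW g v).card + (pvComp g bl p).card := by
    rw [hWfin, Finset.card_union_of_disjoint hdisj]
  have hc2 : (pvW g (pvVSet v p.1 p.2)).card = (pvW g v).card + 1 := by
    rw [hWset, Finset.card_insert_of_notMem hpW]
  rw [bsz, hc1, hc2]
  simp only [List.length_singleton]
  push_cast
  ring

-- the outer fold over any list of in-bounds cells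
lemma pvOuter (g : List (List Int)) (bl : List (Int × Int)) :
    ∀ (L : List (Int × Int)) (v : List (List Bool)) (sizes : List Int),
      (∀ p ∈ L, p ∈ pvCells g) →
      pvShape g v →
      (∀ b ∈ pvCells g, pvVGet v b.1 b.2 = true → pvOkP g bl b = true) →
      (∀ a, pvOkP g bl a = true → pvVGet v a.1 a.2 = true →
          ∀ b, pvAdj g bl a b → pvVGet v b.1 b.2 = true) →
      (∀ s ∈ sizes, ∃ q, pvOkP g bl q = true ∧ s = ((pvComp g bl q).card : Int)) →
      (∀ q, pvOkP g bl q = true → pvVGet v q.1 q.2 = true →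
          ((pvComp g bl q).card : Int) ∈ sizes) →
      (∀ s ∈ (L.foldl (pvCellStep g bl) (v, sizes)).2,
          ∃ q, pvOkP g bl q = true ∧ s = ((pvComp g bl q).card : Int)) ∧
      (∀ q, pvOkP g bl q = true →
          pvVGet (L.foldl (pvCellStep g bl) (v, sizes)).1 q.1 q.2 = true →
          ((pvComp g bl q).card : Int) ∈ (L.foldl (pvCellStep g bl) (v, sizes)).2) ∧
      (∀ b ∈ pvCells g, pvVGet v b.1 b.2 = true →
          pvVGet (L.foldl (pvCellStep g bl) (v, sizes)).1 b.1 b.2 = true) ∧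
      (∀ p ∈ L, pvOkP g bl p = true →
          pvVGet (L.foldl (pvCellStep g bl) (v, sizes)).1 p.1 p.2 = true) := by
  intro L
  induction L with
  | nil =>
    intro v sizes _ _ _ _ h4 h5
    exact ⟨h4, h5, fun b _ hv => hv, by simp⟩
  | cons p rest ih =>
    intro v sizes hLc hsh hvo hcl h4 h5
    have hpc : p ∈ pvCells g := hLc p (List.mem_cons.mpr (Or.inl rfl))
    rw [List.foldl_cons]
    by_cases hcond : (!pvVGet v p.1 p.2 && (pvCellA g p.1 p.2 == 0) && !bl.contains p) = true
    · obtain ⟨hnv, hok⟩ := (pvCond_iff g bl v hpc).mp hcond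
      have hstep : pvCellStep g bl (v, sizes) p =
          ((bfs_loop g bl (pvTotalA g + 1) [p] (pvVSet v p.1 p.2) 0).1,
           sizes ++ [(bfs_loop g bl (pvTotalA g + 1) [p] (pvVSet v p.1 p.2) 0).2]) := by
        simp only [pvCellStep, hcond, if_true]
      rw [hstep]
      obtain ⟨bsh, bch, bsz, bcl⟩ := pvStep_bfs g bl hok hnv hsh hcl
      set v' := (bfs_loop g bl (pvTotalA g + 1) [p] (pvVSet v p.1 p.2) 0).1 with hv'
      have hvo' : ∀ b ∈ pvCells g, pvVGet v' b.1 b.2 = true → pvOkP g bl b = true := by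
        intro b hb hv
        rcases (bch b hb).mp hv with h | h
        · exact hvo b hb h
        · exact pvReach_ok hok h
      have h4' : ∀ s ∈ sizes ++ [(bfs_loop g bl (pvTotalA g + 1) [p] (pvVSet v p.1 p.2) 0).2],
          ∃ q, pvOkP g bl q = true ∧ s = ((pvComp g bl q).card : Int) := by
        intro s hs
        rcases List.mem_append.mp hs with h | h
        · exact h4 s h
        · rcases List.mem_singleton.mp h with rfl
          exact ⟨p, hok, bsz⟩
      have h5' : ∀ q, pvOkP g bl q = true → pvVGet v' q.1 q.2 = true →
          ((pvComp g bl q).card : Int) ∈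
            sizes ++ [(bfs_loop g bl (pvTotalA g + 1) [p] (pvVSet v p.1 p.2) 0).2] := by
        intro q hokq hv
        rcases (bch q (pvOkP_mem_pvCells hokq)).mp hv with h | h
        · exact List.mem_append.mpr (Or.inl (h5 q hokq h))
        · refine List.mem_append.mpr (Or.inr (List.mem_singleton.mpr ?_))
          rw [bsz, pvComp_eq_of_reach h]
      obtain ⟨c1, c2, c3, c4⟩ := ih v'
        (sizes ++ [(bfs_loop g bl (pvTotalA g + 1) [p] (pvVSet v p.1 p.2) 0).2])
        (fun q hq => hLc q (List.mem_cons.mpr (Or.inr hq))) bsh hvo' bcl h4' h5'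
      refine ⟨c1, c2, ?_, ?_⟩
      · intro b hb hv
        exact c3 b hb ((bch b hb).mpr (Or.inl hv))
      · intro q hq hokq
        rcases List.mem_cons.mp hq with rfl | hq2
        · exact c3 q (pvOkP_mem_pvCells hokq)
            ((bch q (pvOkP_mem_pvCells hokq)).mpr (Or.inr Relation.ReflTransGen.refl))
        · exact c4 q hq2 hokq
    · have hstep : pvCellStep g bl (v, sizes) p = (v, sizes) := by
        simp only [pvCellStep]
        rw [if_neg hcond]
      rw [hstep]
      obtain ⟨c1, c2, c3, c4⟩ := ih v sizes
        (fun q hq => hLc q (List.mem_cons.mpr (Or.inr hq))) hsh hvo hcl h4 h5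
      refine ⟨c1, c2, c3, ?_⟩
      intro q hq hokq
      rcases List.mem_cons.mp hq with rfl | hq2
      · have hvq : pvVGet v q.1 q.2 = true := by
          by_contra hnv
          exact hcond ((pvCond_iff g bl v hpc).mpr ⟨hnv, hokq⟩)
        exact c3 q hpc hvq
      · exact c4 q hq2 hokq

-- A's boolean, characterised
lemma pvA_false_iff (g : List (List Int)) (bl : List (Int × Int)) (smallest : Int) :
    ((find_contiguous_regions g bl).any
        (fun size => decide (0 < size) && decide (size < smallest)) = true) ↔
      ∃ q, pvOkP g bl q = true ∧ ((pvComp g bl q).card : Int) < smallest := by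
  rw [pv_find_eq_foldl]
  have hinit2 : ∀ (r c : Int),
      pvVGet (g.map (fun row => List.replicate row.length false)) r c = false :=
    pvVGet_init g
  obtain ⟨c1, c2, c3, c4⟩ := pvOuter g bl (pvCells g)
    (g.map (fun row => List.replicate row.length false)) []
    (fun p hp => hp) (pvShape_init g)
    (fun b _ hv => absurd hv (by simp [hinit2]))
    (fun a _ hv => absurd hv (by simp [hinit2]))
    (by simp) (fun q _ hv => absurd hv (by simp [hinit2]))
  rw [List.any_eq_true]
  constructor
  · rintro ⟨s, hs, hcond⟩
    simp only [Bool.and_eq_true, decide_eq_true_eq] at hcond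
    obtain ⟨q, hok, rfl⟩ := c1 s hs
    exact ⟨q, hok, hcond.2⟩
  · rintro ⟨q, hok, hlt⟩
    have hqc : q ∈ pvCells g := pvOkP_mem_pvCells hok
    have hvq := c4 q hqc hok
    have hmem := c2 q hok hvq
    refine ⟨((pvComp g bl q).card : Int), hmem, ?_⟩
    simp only [Bool.and_eq_true, decide_eq_true_eq]
    exact ⟨by exact_mod_cast pvComp_card_pos hok, hlt⟩

-- ---------- B-side lemmas ----------

lemma pvCellA_lookup (g : List (List Int)) (k j : Nat) (hk : k < g.length)
    (hj : j < (g[k]).length) : pvCellA g (k : Int) (j : Int) = g[k][j] := by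
  rw [pvCellA, pvRowA_natCast, List.getElem?_eq_getElem hk, Option.getD_some,
      PySem.List.pyGet?_natCast, List.getElem?_eq_getElem hj, Option.getD_some]

lemma pv_mem_pvEmpties (g : List (List Int)) (bl : List (Int × Int)) (p : Int × Int) :
    p ∈ pvEmpties g bl ↔ pvOkP g bl p = true := by
  rw [pvOkP_iff]
  simp only [pvEmpties, List.mem_flatMap, List.mem_map, List.mem_filter,
    PySem.List.mem_enumerate_iff, Bool.and_eq_true, beq_iff_eq, Bool.not_eq_true']
  constructor
  · rintro ⟨rr, ⟨k, hk, rfl⟩, cv, ⟨⟨j, hj, rfl⟩, hz, hb⟩, rfl⟩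
    simp only [zero_add] at *
    have hrow : pvRowA g (k : Int) = g[k] := by
      rw [pvRowA_natCast, List.getElem?_eq_getElem hk, Option.getD_some]
    refine ⟨⟨by positivity, by exact_mod_cast hk, by positivity, ?_⟩, ?_, hb⟩
    · rw [hrow]; exact_mod_cast hj
    · rw [pvCellA_lookup g k j hk hj]; exact hz
  · rintro ⟨⟨h1, h2, h3, h4⟩, hz, hb⟩
    obtain ⟨r, c⟩ := p
    have hk : r.toNat < g.length := by omega
    have hrow : pvRowA g r = g[r.toNat] := by
      conv_lhs => rw [show r = ((r.toNat : Nat) : Int) by omega]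
      rw [pvRowA_natCast, List.getElem?_eq_getElem hk, Option.getD_some]
    have hj : c.toNat < (g[r.toNat]).length := by
      rw [hrow] at h4; omega
    refine ⟨((r.toNat : Int), g[r.toNat]), ⟨r.toNat, hk, by simp⟩,
      ((c.toNat : Int), g[r.toNat][c.toNat]), ⟨⟨c.toNat, hj, by simp⟩, ?_, ?_⟩, ?_⟩
    · rw [← pvCellA_lookup g r.toNat c.toNat hk hj,
          show ((r.toNat : Nat) : Int) = r by omega, show ((c.toNat : Nat) : Int) = c by omega]
      exact hz
    · rw [show ((r.toNat : Nat) : Int) = r by omega, show ((c.toNat : Nat) : Int) = c by omega]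
      exact hb
    · simp only [Prod.mk.injEq]
      constructor <;> omega

lemma pv_nbrs_map_eq (a : Int × Int) :
    [((1 : Int), (0 : Int)), (-1, 0), (0, 1), (0, -1)].map
        (fun d => (a.1 + d.1, a.2 + d.2)) = pvNbrs a := by
  simp [pvNbrs, sub_eq_add_neg]

lemma pv_mem_pvGrown (g : List (List Int)) (bl : List (Int × Int))
    (comp : PySem.Set (Int × Int)) (x : Int × Int) :
    x ∈ pvGrown (PySem.Set.ofList (pvEmpties g bl)) comp ↔
      (∃ a ∈ comp, x ∈ pvNbrs a) ∧ pvOkP g bl x = true := by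
  rw [pvGrown, PySem.Set.mem_inter, PySem.Set.mem_ofList, PySem.Set.mem_ofList,
      List.mem_flatMap]
  simp only [pv_nbrs_map_eq, pv_mem_pvEmpties]

lemma pvSatur_spec (g : List (List Int)) (bl : List (Int × Int)) (p : Int × Int)
    (hok : pvOkP g bl p = true) :
    ∀ (fuel : Nat) (comp : PySem.Set (Int × Int)), comp.Nodup → p ∈ comp →
      (∀ x ∈ comp, x ∈ pvComp g bl p) →
      (pvComp g bl p).card ≤ fuel + comp.length →
      (pvSatur (PySem.Set.ofList (pvEmpties g bl)) fuel comp).Nodup ∧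
      (∀ x, x ∈ pvSatur (PySem.Set.ofList (pvEmpties g bl)) fuel comp ↔
          x ∈ pvComp g bl p) := by
  intro fuel
  induction fuel with
  | zero =>
    intro comp hnd hp hsub hcard
    have h1 : comp.toFinset ⊆ pvComp g bl p :=
      fun x hx => hsub x (List.mem_toFinset.mp hx)
    have h2 : comp.toFinset = pvComp g bl p := by
      apply Finset.eq_of_subset_of_card_le h1
      rw [List.toFinset_card_of_nodup hnd]
      omega
    refine ⟨hnd, fun x => ?_⟩
    rw [show pvSatur (PySem.Set.ofList (pvEmpties g bl)) 0 comp = comp from rfl,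
        ← List.mem_toFinset, h2]
  | succ fuel ih =>
    intro comp hnd hp hsub hcard
    rw [show pvSatur (PySem.Set.ofList (pvEmpties g bl)) (fuel + 1) comp =
        (if PySem.Set.issubset (pvGrown (PySem.Set.ofList (pvEmpties g bl)) comp) comp then comp
         else pvSatur (PySem.Set.ofList (pvEmpties g bl)) fuel
           (PySem.Set.union comp (pvGrown (PySem.Set.ofList (pvEmpties g bl)) comp))) from rfl]
    by_cases hss : PySem.Set.issubset (pvGrown (PySem.Set.ofList (pvEmpties g bl)) comp) comp = true
    · rw [if_pos hss]
      have hreach : ∀ x, pvReach g bl p x → x ∈ comp := by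
        intro x hr
        induction hr with
        | refl => exact hp
        | @tail m b _ hadj ih2 =>
          have hb : b ∈ pvGrown (PySem.Set.ofList (pvEmpties g bl)) comp :=
            (pv_mem_pvGrown g bl comp b).mpr ⟨⟨m, ih2, hadj.2.2⟩, hadj.2.1⟩
          exact (PySem.Set.issubset_iff _ _).mp hss b hb
      refine ⟨hnd, fun x => ⟨fun hx => hsub x hx, fun hx => ?_⟩⟩
      exact hreach x (pv_mem_pvComp.mp hx).2
    · rw [if_neg hss]
      obtain ⟨w, hwG, hwC⟩ : ∃ w ∈ pvGrown (PySem.Set.ofList (pvEmpties g bl)) comp,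
          w ∉ comp := by
        by_contra h
        push_neg at h
        exact hss ((PySem.Set.issubset_iff _ _).mpr h)
      have hnd' : (PySem.Set.union comp
          (pvGrown (PySem.Set.ofList (pvEmpties g bl)) comp)).Nodup :=
        PySem.Set.nodup_union _ _ hnd
      have hp' : p ∈ PySem.Set.union comp (pvGrown (PySem.Set.ofList (pvEmpties g bl)) comp) :=
        (PySem.Set.mem_union _ _ _).mpr (Or.inl hp)
      have hsub' : ∀ x ∈ PySem.Set.union comp
          (pvGrown (PySem.Set.ofList (pvEmpties g bl)) comp), x ∈ pvComp g bl p := by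
        intro x hx
        rcases (PySem.Set.mem_union _ _ _).mp hx with h | h
        · exact hsub x h
        · obtain ⟨⟨a, ha, hnb⟩, hokx⟩ := (pv_mem_pvGrown g bl comp x).mp h
          have hra : pvReach g bl p a := (pv_mem_pvComp.mp (hsub a ha)).2
          have hoka : pvOkP g bl a = true := pvReach_ok hok hra
          exact pv_mem_pvComp.mpr
            ⟨pvOkP_mem_pvCells hokx, hra.tail ⟨hoka, hokx, hnb⟩⟩
      have hlen : comp.length + 1 ≤
          (PySem.Set.union comp (pvGrown (PySem.Set.ofList (pvEmpties g bl)) comp)).length := by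
        have h1 : insert w comp.toFinset ⊆
            (PySem.Set.union comp (pvGrown (PySem.Set.ofList (pvEmpties g bl)) comp)).toFinset := by
          intro x hx
          rcases Finset.mem_insert.mp hx with rfl | hx2
          · exact List.mem_toFinset.mpr ((PySem.Set.mem_union _ _ _).mpr (Or.inr hwG))
          · exact List.mem_toFinset.mpr
              ((PySem.Set.mem_union _ _ _).mpr (Or.inl (List.mem_toFinset.mp hx2)))
        have h2 := Finset.card_le_card h1
        rw [Finset.card_insert_of_notMem (fun hc => hwC (List.mem_toFinset.mp hc)),
            List.toFinset_card_of_nodup hnd, List.toFinset_card_of_nodup hnd'] at h2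
        omega
      exact ih (PySem.Set.union comp (pvGrown (PySem.Set.ofList (pvEmpties g bl)) comp))
        hnd' hp' hsub' (by omega)

lemma pvComp_card_le (g : List (List Int)) (bl : List (Int × Int)) (p : Int × Int)
    (hok : pvOkP g bl p = true) :
    (pvComp g bl p).card ≤ (pvEmpties g bl).length := by
  have hsub : pvComp g bl p ⊆ (pvEmpties g bl).toFinset := by
    intro x hx
    obtain ⟨_, hr⟩ := pv_mem_pvComp.mp hx
    exact List.mem_toFinset.mpr ((pv_mem_pvEmpties g bl x).mpr (pvReach_ok hok hr))
  calc (pvComp g bl p).card ≤ (pvEmpties g bl).toFinset.card := Finset.card_le_card hsub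
    _ ≤ (pvEmpties g bl).length := List.toFinset_card_le _

lemma pvSatur_length (g : List (List Int)) (bl : List (Int × Int)) {p : Int × Int}
    (hp : p ∈ pvEmpties g bl) :
    (pvSatur (PySem.Set.ofList (pvEmpties g bl)) (pvEmpties g bl).length
        (PySem.Set.ofList [p])).length = (pvComp g bl p).card := by
  have hok := (pv_mem_pvEmpties g bl p).mp hp
  have hnd0 : (PySem.Set.ofList [p] : PySem.Set (Int × Int)).Nodup := PySem.Set.nodup_ofList _
  have hp0 : p ∈ (PySem.Set.ofList [p] : PySem.Set (Int × Int)) :=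
    (PySem.Set.mem_ofList _ _).mpr (List.mem_singleton.mpr rfl)
  have hsub0 : ∀ x ∈ (PySem.Set.ofList [p] : PySem.Set (Int × Int)), x ∈ pvComp g bl p := by
    intro x hx
    rcases List.mem_singleton.mp ((PySem.Set.mem_ofList _ _).mp hx) with rfl
    exact pv_self_mem_pvComp hok
  have hcard0 : (pvComp g bl p).card ≤
      (pvEmpties g bl).length + (PySem.Set.ofList [p] : PySem.Set (Int × Int)).length := by
    have := pvComp_card_le g bl p hok
    omega
  obtain ⟨hnd, hmem⟩ := pvSatur_spec g bl p hok (pvEmpties g bl).length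
    (PySem.Set.ofList [p]) hnd0 hp0 hsub0 hcard0
  have hfs : (pvSatur (PySem.Set.ofList (pvEmpties g bl)) (pvEmpties g bl).length
      (PySem.Set.ofList [p])).toFinset = pvComp g bl p := by
    apply Finset.ext; intro x
    rw [List.mem_toFinset]
    exact hmem x
  rw [← List.toFinset_card_of_nodup hnd, hfs]

lemma pvScanB_iff (g : List (List Int)) (bl : List (Int × Int)) (smallest : Int) :
    ∀ (L : List (Int × Int)), (∀ p ∈ L, p ∈ pvEmpties g bl) →
      (pvScanB (PySem.Set.ofList (pvEmpties g bl)) (pvEmpties g bl).length smallest L = true ↔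
        ∀ p ∈ L, ¬ (((pvComp g bl p).card : Int) < smallest)) := by
  intro L
  induction L with
  | nil =>
    intro _
    simp [show pvScanB (PySem.Set.ofList (pvEmpties g bl)) (pvEmpties g bl).length smallest
      ([] : List (Int × Int)) = true from rfl]
  | cons q rest ih =>
    intro hL
    have hq := hL q (List.mem_cons.mpr (Or.inl rfl))
    have hlen := pvSatur_length g bl hq
    rw [show pvScanB (PySem.Set.ofList (pvEmpties g bl)) (pvEmpties g bl).length smallest
          (q :: rest) =
        (if decide (((pvSatur (PySem.Set.ofList (pvEmpties g bl)) (pvEmpties g bl).length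
              (PySem.Set.ofList [q])).length : Int) < smallest) then false
         else pvScanB (PySem.Set.ofList (pvEmpties g bl)) (pvEmpties g bl).length smallest rest)
        from rfl, hlen]
    by_cases hlt : ((pvComp g bl q).card : Int) < smallest
    · rw [if_pos (by simpa using hlt)]
      constructor
      · intro h
        exact absurd h (by simp)
      · intro h
        exact absurd hlt (h q (List.mem_cons.mpr (Or.inl rfl)))
    · rw [if_neg (by simpa using hlt),
          ih (fun p hp => hL p (List.mem_cons.mpr (Or.inr hp)))]
      constructor
      · intro h p hp
        rcases List.mem_cons.mp hp with rfl | hp2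
        · exact hlt
        · exact h p hp2
      · intro h p hp
        exact h p (List.mem_cons.mpr (Or.inr hp))

lemma pvB_true_iff (g : List (List Int)) (bl : List (Int × Int)) (smallest : Int) :
    (pvScanB (PySem.Set.ofList (pvEmpties g bl)) (pvEmpties g bl).length smallest
        (pvEmpties g bl) = true ↔
      ¬ ∃ q, pvOkP g bl q = true ∧ ((pvComp g bl q).card : Int) < smallest) := by
  rw [pvScanB_iff g bl smallest (pvEmpties g bl) (fun p hp => hp)]
  constructor
  · rintro h ⟨q, hok, hlt⟩
    exact h q ((pv_mem_pvEmpties g bl q).mpr hok) hlt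
  · intro h p hp hlt
    exact h ⟨p, (pv_mem_pvEmpties g bl p).mp hp, hlt⟩

-- ===== VERDICT (by name: the statement is the Claim_ definition above) =====
theorem has_enough_space_spec : Claim_equal_has_enough_space := by
  intro grid blocked_areas piece_areas index _
  unfold Spec_has_enough_space
  rw [has_enough_space, has_enough_space_alt]
  by_cases hrem : (PySem.List.slice piece_areas (some index) none).isEmpty = true
  · rw [if_pos hrem, if_pos hrem]
  · rw [if_neg hrem, if_neg hrem]
    set smallest := (PySem.List.min? (PySem.List.slice piece_areas (some index) none)
      (fun x => x)).getD 0 with hsm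
    show (if ((find_contiguous_regions grid blocked_areas).any
            (fun size => decide (0 < size) && decide (size < smallest))) = true
          then false else true) =
        pvScanB (PySem.Set.ofList (pvEmpties grid blocked_areas))
          (pvEmpties grid blocked_areas).length smallest (pvEmpties grid blocked_areas)
    rw [Bool.eq_iff_iff, pvB_true_iff grid blocked_areas smallest]
    constructor
    · intro hA hex
      rw [← pvA_false_iff grid blocked_areas smallest] at hex
      rw [if_pos hex] at hA
      exact absurd hA (by simp)
    · intro hB
      rw [if_neg (fun hc => hB ((pvA_false_iff grid blocked_areas smallest).mp hc))]
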